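-- pv_equiv track=rewrite | github.com/mugglim/kakao-coding-test | 2018-kakao-blind-recruitment/Q4.프렌즈4블록.py | solution
-- ===== SOURCE A (Python) =====
-- dx = [0, 1, 0, 1]
--
-- dy = [0, 0, 1, 1]
--
-- def solution(m, n, board):
--     cnt = 0
--     board = [list(row) for row in board]
--
--     def chk(i, j):
--         if not board[i][j]:
--             return False
--         if i+1 >= m or j+1 >= n:
--             return False
--         return board[i][j] == board[i][j+1] == board[i+1][j] == board[i+1][j+1]
--
--     def move():
--         for j in range(n):
--             for i in range(m-2, -1, -1):
--                 k = i
--                 while k+1 < m and board[k][j] and not board[k+1][j]: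
--                     board[k][j], board[k+1][j] = board[k+1][j], board[k][j]
--                     k += 1
--
--     while True:
--         pop_dic = {}
--
--         for i in range(m-1):
--             for j in range(n-1):
--                 if chk(i, j):
--                     for k in range(4):
--                         ni, nj = i+dy[k], j+dx[k]
--                         pop_dic[(ni, nj)] = True
--
--         if not pop_dic:
--             break
--
--         for (i, j) in pop_dic.keys():
--             board[i][j] = ''
--
--         cnt += len(pop_dic)
--         move()
--
--     return cnt
-- ===== SOURCE B (Python) =====
-- def solution(m, n, board):
--     grid = [list(row) for row in board]
--     total = 0
--     while True:
--         marked = set()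
--         for i in range(m - 1):
--             for j in range(n - 1):
--                 c = grid[i][j]
--                 if c and c == grid[i][j + 1] and c == grid[i + 1][j] and c == grid[i + 1][j + 1]:
--                     marked.update([(i, j), (i, j + 1), (i + 1, j), (i + 1, j + 1)])
--         if not marked:
--             return total
--         total += len(marked)
--         for (i, j) in marked:
--             grid[i][j] = ''
--         for j in range(n):
--             stack = [grid[i][j] for i in range(m) if grid[i][j]]
--             column = [''] * (m - len(stack)) + stack
--             for i in range(m):
--                 grid[i][j] = column[i]
-- ===== Notes on version B (the rewrite author's own statement) =====
-- stated objective: simpler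
-- what changed: Gravity is rewritten: instead of A's per-cell bubble-swap percolation (inner while loop sinking each block one swap at a time), B rebuilds each column in one pass as blanks-padding plus the filtered non-empty cells, and the removal bookkeeping uses a set of marked coordinates instead of a dict of popped keys.
-- outside the precondition, e.g. on solution(2, 2, ['aaa', 'aaa', 'bbb']): A returns 4, B returns 4
import Mathlib
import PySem

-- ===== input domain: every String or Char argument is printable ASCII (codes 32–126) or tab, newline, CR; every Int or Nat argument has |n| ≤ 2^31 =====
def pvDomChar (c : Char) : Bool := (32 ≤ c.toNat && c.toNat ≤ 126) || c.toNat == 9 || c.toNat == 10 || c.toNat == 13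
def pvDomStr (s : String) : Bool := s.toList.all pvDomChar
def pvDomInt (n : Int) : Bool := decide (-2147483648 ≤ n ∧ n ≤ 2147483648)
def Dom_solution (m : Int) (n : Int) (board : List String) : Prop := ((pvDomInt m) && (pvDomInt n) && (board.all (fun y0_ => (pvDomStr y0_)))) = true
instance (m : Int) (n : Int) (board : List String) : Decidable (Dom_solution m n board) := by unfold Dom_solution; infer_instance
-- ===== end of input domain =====

-- B replaces A's per-cell bubble-swap gravity by a one-pass filter-and-pad rebuild of each
-- column (objective: simpler); return-value equivalence only (the Python A mutates no argument).
-- Board cells are '' or a single character; a cell is modelled as Option Char (none = '').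

-- ===== PORT A =====
abbrev PvGrid := List (List (Option Char))

-- board[i][j] (Python semantics via pyGetD; in-range on every access A performs under Pre_)
def pvGet (g : PvGrid) (i j : Int) : Option Char :=
  PySem.List.pyGetD (PySem.List.pyGetD g i []) j none

-- board[i][j] = v
def pvSet (g : PvGrid) (i j : Int) (v : Option Char) : PvGrid :=
  PySem.List.pySetD g i (PySem.List.pySetD (PySem.List.pyGetD g i []) j v)

-- board = [list(row) for row in board]
def pvToGrid (board : List String) : PvGrid := board.map (fun s => s.toList.map some)

def pvDx : List Int := [0, 1, 0, 1]
def pvDy : List Int := [0, 0, 1, 1]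

-- chk(i, j); the chained a==b==c==d is (a==b) and (b==c) and (c==d)
def pvChk (m n : Int) (g : PvGrid) (i j : Int) : Bool :=
  if pvGet g i j = none then false
  else if i + 1 ≥ m ∨ j + 1 ≥ n then false
  else (pvGet g i j == pvGet g i (j+1)) && (pvGet g i (j+1) == pvGet g (i+1) j) &&
       (pvGet g (i+1) j == pvGet g (i+1) (j+1))

-- the pop_dic-building double loop of one round
def pvPop (m n : Int) (g : PvGrid) : PySem.Dict (Int × Int) Bool :=
  (PySem.List.pyRange 0 (m-1) 1).foldl (fun d i =>
    (PySem.List.pyRange 0 (n-1) 1).foldl (fun d j =>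
      if pvChk m n g i j then
        (PySem.List.pyRange 0 4 1).foldl (fun d k =>
          d.insert (i + PySem.List.pyGetD pvDy k 0, j + PySem.List.pyGetD pvDx k 0) true) d
      else d) d) PySem.Dict.empty

-- the inner 'while k+1 < m and board[k][j] and not board[k+1][j]' of move(); k strictly
-- increases and the guard needs k+1 < m, so fuel = m.toNat always suffices
def pvSink (m j : Int) : Nat → Int → PvGrid → PvGrid
  | 0, _, g => g
  | fuel+1, k, g =>
    if k + 1 < m ∧ ¬ pvGet g k j = none ∧ pvGet g (k+1) j = none then
      pvSink m j fuel (k+1)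
        (pvSet (pvSet g k j (pvGet g (k+1) j)) (k+1) j (pvGet g k j))
    else g

-- move()
def pvMove (m n : Int) (g : PvGrid) : PvGrid :=
  (PySem.List.pyRange 0 n 1).foldl (fun g j =>
    (PySem.List.pyRange (m-2) (-1) (-1)).foldl (fun g i => pvSink m j m.toNat i g) g) g

-- the outer 'while True'; each non-break round blanks ≥ 4 previously occupied cells of the
-- m×n window and move() only permutes cells, so the loop runs at most m*n+1 times: the fuel
-- m.toNat * n.toNat + 1 is never exhausted on inputs admitted by Pre_
def pvLoopA (m n : Int) : Nat → PvGrid → Int → Int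
  | 0, _, cnt => cnt
  | fuel+1, g, cnt =>
    let d := pvPop m n g
    if d.size = 0 then cnt
    else pvLoopA m n fuel (pvMove m n (d.keys.foldl (fun g p => pvSet g p.1 p.2 none) g))
           (cnt + d.size)

def solution (m : Int) (n : Int) (board : List String) : Int :=
  pvLoopA m n (m.toNat * n.toNat + 1) (pvToGrid board) 0

-- ===== PORT B =====
-- the marked-set-building double loop of one round
def pvMark (m n : Int) (g : PvGrid) : PySem.Set (Int × Int) :=
  (PySem.List.pyRange 0 (m-1) 1).foldl (fun s i =>
    (PySem.List.pyRange 0 (n-1) 1).foldl (fun s j =>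
      let c := pvGet g i j
      if c.isSome && (c == pvGet g i (j+1)) && (c == pvGet g (i+1) j) &&
         (c == pvGet g (i+1) (j+1)) then
        PySem.Set.update s [(i, j), (i, j+1), (i+1, j), (i+1, j+1)]
      else s) s) PySem.Set.empty

-- filter-and-pad gravity: rebuild every column in one pass
def pvGravity (m n : Int) (g : PvGrid) : PvGrid :=
  (PySem.List.pyRange 0 n 1).foldl (fun g j =>
    let stack := ((PySem.List.pyRange 0 m 1).map (fun i => pvGet g i j)).filter
      (fun c => c.isSome)
    let column := List.replicate (m - (stack.length : Int)).toNat none ++ stack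
    (PySem.List.pyRange 0 m 1).foldl
      (fun g i => pvSet g i j (PySem.List.pyGetD column i none)) g) g

-- B's 'while True' with the same (never-exhausted) fuel bound as A's
def pvLoopB (m n : Int) : Nat → PvGrid → Int → Int
  | 0, _, total => total
  | fuel+1, g, total =>
    let s := pvMark m n g
    if s.length = 0 then total
    else pvLoopB m n fuel (pvGravity m n (s.foldl (fun g p => pvSet g p.1 p.2 none) g))
           (total + s.length)

def solution_alt (m : Int) (n : Int) (board : List String) : Int :=
  pvLoopB m n (m.toNat * n.toNat + 1) (pvToGrid board) 0

-- ===== PRECONDITION & SPEC =====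
-- Pre_ excludes the shapes on which the Python A raises IndexError (fewer than m rows or a
-- row shorter than n while m ≥ 2 and n ≥ 2); when m ≤ 1 or n ≤ 1 A indexes nothing and
-- returns 0, so any board is admitted there.  Stated narrowing: Pre_ also excludes oversized
-- boards (more than m rows / rows longer than n with m, n ≥ 2), on which A returns using only
-- the top-left m×n window — B agrees there too, but the proof covers exact dimensions only.
def Pre_solution (m : Int) (n : Int) (board : List String) : Prop :=
  (m ≤ 1 ∨ n ≤ 1) ∨
  ((board.length : Int) = m ∧ ∀ s ∈ board, ((PySem.Str.len s : Int) = n))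
instance (m : Int) (n : Int) (board : List String) : Decidable (Pre_solution m n board) := by
  unfold Pre_solution; infer_instance

def pvWitness_solution : Int × Int × List String := (2, 2, ["ab", "cd"])

def Spec_solution (m : Int) (n : Int) (board : List String) (out : Int) : Prop := out = solution_alt m n board
instance (m : Int) (n : Int) (board : List String) (out : Int) : Decidable (Spec_solution m n board out) := by unfold Spec_solution; infer_instance

-- ===== CLAIM (what is proved, stated in full; the proofs are below) =====
def Claim_equal_solution : Prop := ∀ (m : Int) (n : Int) (board : List String), Dom_solution m n board → Pre_solution m n board → Spec_solution m n board (solution m n board)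

-- ===== LEMMAS AND PROOFS =====

-- generic fold tools ------------------------------------------------------

lemma pvFoldlRel {α σ τ : Type} (R : σ → τ → Prop) (f : σ → α → σ) (f' : τ → α → τ) :
    ∀ (l : List α) (s : σ) (t : τ), R s t →
      (∀ s t a, a ∈ l → R s t → R (f s a) (f' t a)) →
      R (l.foldl f s) (l.foldl f' t) := by
  intro l
  induction l with
  | nil => intro s t h _; exact h
  | cons a l ih =>
    intro s t h hstep
    exact ih _ _ (hstep s t a (by simp) h)
      (fun s t b hb hr => hstep s t b (by simp [hb]) hr)

lemma pvFoldlInv {α σ : Type} (P : σ → Prop) (f : σ → α → σ) :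
    ∀ (l : List α) (s : σ), P s → (∀ s a, a ∈ l → P s → P (f s a)) → P (l.foldl f s) := by
  intro l
  induction l with
  | nil => intro s h _; exact h
  | cons a l ih =>
    intro s h hstep
    exact ih _ (hstep s a (by simp) h) (fun s b hb hs => hstep s b (by simp [hb]) hs)

lemma pvFoldlCongrInv {α σ : Type} (P : σ → Prop) (f f' : σ → α → σ) :
    ∀ (l : List α) (s : σ), P s →
      (∀ s a, a ∈ l → P s → f s a = f' s a ∧ P (f s a)) →
      l.foldl f s = l.foldl f' s ∧ P (l.foldl f s) := by
  intro l
  induction l with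
  | nil => intro s h _; exact ⟨rfl, h⟩
  | cons a l ih =>
    intro s h hstep
    obtain ⟨he, hp⟩ := hstep s a (by simp) h
    have := ih (f s a) hp (fun s b hb hs => hstep s b (by simp [hb]) hs)
    exact ⟨by simpa [List.foldl_cons, he] using this.1, this.2⟩

-- small list facts used by the column argument ----------------------------

lemma pv_getD_mid {α : Type} (u rest : List α) (x d : α) :
    (u ++ x :: rest).getD u.length d = x := by
  induction u with
  | nil => rfl
  | cons a u ih => simp

lemma pv_set_mid {α : Type} (u rest : List α) (x v : α) :
    (u ++ x :: rest).set u.length v = u ++ v :: rest := by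
  induction u with
  | nil => rfl
  | cons a u ih => simp [ih]

-- dimensions invariant -----------------------------------------------------

def pvDims (m n : Int) (g : PvGrid) : Prop :=
  (g.length : Int) = m ∧ ∀ r ∈ g, (r.length : Int) = n

lemma pv_pyIdx?_lt (n : Nat) (i : Int) (k : Nat) (h : PySem.List.pyIdx? n i = some k) :
    k < n := by
  unfold PySem.List.pyIdx? at h
  split_ifs at h with h1 h2 h3 <;> simp at h <;> omega

lemma pvSet_out (g : PvGrid) (i j : Int) (v : Option Char)
    (h : PySem.List.pyIdx? g.length i = none) : pvSet g i j v = g := by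
  unfold pvSet PySem.List.pySetD PySem.List.pySet?
  simp [h]

lemma pvSet_in (g : PvGrid) (i j : Int) (v : Option Char) (k : Nat)
    (h : PySem.List.pyIdx? g.length i = some k) :
    pvSet g i j v = g.set k (PySem.List.pySetD (g[k]'(pv_pyIdx?_lt _ _ _ h)) j v) := by
  have hk := pv_pyIdx?_lt _ _ _ h
  unfold pvSet PySem.List.pySetD PySem.List.pySet? PySem.List.pyGetD PySem.List.pyGet?
  simp [h, List.getElem?_eq_getElem hk]

lemma pvDims_set (m n : Int) (g : PvGrid) (i j : Int) (v : Option Char)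
    (h : pvDims m n g) : pvDims m n (pvSet g i j v) := by
  obtain ⟨h1, h2⟩ := h
  cases hk : PySem.List.pyIdx? g.length i with
  | none => rw [pvSet_out g i j v hk]; exact ⟨h1, h2⟩
  | some k =>
    rw [pvSet_in g i j v k hk]
    refine ⟨by simpa using h1, ?_⟩
    intro r hr
    rcases List.mem_or_eq_of_mem_set hr with hr' | hr'
    · exact h2 r hr'
    · subst hr'
      rw [PySem.List.length_pySetD]
      exact h2 _ (List.getElem_mem _)

-- degenerate m ≤ 1 or n ≤ 1: nothing is ever detected ----------------------

lemma pvPop_degenerate (m n : Int) (g : PvGrid) (h : m ≤ 1 ∨ n ≤ 1) :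
    pvPop m n g = PySem.Dict.empty := by
  unfold pvPop
  rcases h with h | h
  · rw [show PySem.List.pyRange 0 (m-1) 1 = [] from PySem.List.pyRange_one_eq_nil (by omega)]
    rfl
  · rw [show PySem.List.pyRange 0 (n-1) 1 = [] from PySem.List.pyRange_one_eq_nil (by omega)]
    simp

lemma pvMark_degenerate (m n : Int) (g : PvGrid) (h : m ≤ 1 ∨ n ≤ 1) :
    pvMark m n g = PySem.Set.empty := by
  unfold pvMark
  rcases h with h | h
  · rw [show PySem.List.pyRange 0 (m-1) 1 = [] from PySem.List.pyRange_one_eq_nil (by omega)]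
    rfl
  · rw [show PySem.List.pyRange 0 (n-1) 1 = [] from PySem.List.pyRange_one_eq_nil (by omega)]
    simp

lemma pvLoopA_degenerate (m n : Int) (h : m ≤ 1 ∨ n ≤ 1) (fuel : Nat) (g : PvGrid) (cnt : Int) :
    pvLoopA m n (fuel + 1) g cnt = cnt := by
  simp [pvLoopA, pvPop_degenerate m n g h, PySem.Dict.size_empty]

lemma pvLoopB_degenerate (m n : Int) (h : m ≤ 1 ∨ n ≤ 1) (fuel : Nat) (g : PvGrid) (cnt : Int) :
    pvLoopB m n (fuel + 1) g cnt = cnt := by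
  simp [pvLoopB, pvMark_degenerate m n g h, PySem.Set.empty]

-- one round: A's dict keys are exactly B's marked set ----------------------

lemma pv_quad_map (i j : Int) :
    (PySem.List.pyRange 0 4 1).map
        (fun k => (i + PySem.List.pyGetD pvDy k 0, j + PySem.List.pyGetD pvDx k 0)) =
      [(i, j), (i, j+1), (i+1, j), (i+1, j+1)] := by
  rw [show PySem.List.pyRange 0 4 1 = [0, 1, 2, 3] from rfl]
  norm_num [pvDx, pvDy, PySem.List.pyGetD, PySem.List.pyGet?, PySem.List.pyIdx?]
  decide

lemma pv_chain (a : Char) (B C D : Option Char) :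
    ((some a == B) && (B == C) && (C == D)) =
      ((some a == B) && (some a == C) && (some a == D)) := by
  by_cases h1 : B = some a
  · subst h1
    by_cases h2 : C = some a
    · subst h2
      by_cases h3 : D = some a
      · subst h3; simp
      · simp [beq_eq_false_iff_ne.mpr (Ne.symm h3)]
    · simp [beq_eq_false_iff_ne.mpr (Ne.symm h2)]
  · simp [beq_eq_false_iff_ne.mpr (Ne.symm h1)]

lemma pvChk_eq (m n : Int) (g : PvGrid) (i j : Int) (hi : i < m - 1) (hj : j < n - 1) :
    pvChk m n g i j =
      ((pvGet g i j).isSome && (pvGet g i j == pvGet g i (j+1)) &&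
       (pvGet g i j == pvGet g (i+1) j) && (pvGet g i j == pvGet g (i+1) (j+1))) := by
  unfold pvChk
  by_cases hnone : pvGet g i j = none
  · simp [hnone]
  · rw [if_neg hnone, if_neg (by omega)]
    obtain ⟨a, ha⟩ := Option.ne_none_iff_exists'.mp hnone
    rw [ha]
    simp only [Option.isSome_some, Bool.true_and]
    exact pv_chain a _ _ _

lemma pvPop_keys (m n : Int) (g : PvGrid) : (pvPop m n g).keys = pvMark m n g := by
  unfold pvPop pvMark
  apply pvFoldlRel (R := fun (d : PySem.Dict (Int × Int) Bool) (s : PySem.Set (Int × Int)) =>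
    d.keys = s)
  · exact PySem.Dict.keys_empty
  · intro d s i hi hds
    apply pvFoldlRel (R := fun (d : PySem.Dict (Int × Int) Bool) (s : PySem.Set (Int × Int)) =>
      d.keys = s)
    · exact hds
    · intro d s j hj hds'
      have hi' := (PySem.List.mem_pyRange_one.mp hi).2
      have hj' := (PySem.List.mem_pyRange_one.mp hj).2
      rw [pvChk_eq m n g i j hi' hj']
      by_cases hc : ((pvGet g i j).isSome && (pvGet g i j == pvGet g i (j+1)) &&
          (pvGet g i j == pvGet g (i+1) j) && (pvGet g i j == pvGet g (i+1) (j+1))) = true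
      · rw [if_pos hc, if_pos hc, PySem.Dict.keys_foldl_insert_key, pv_quad_map, hds']
      · rw [if_neg hc, if_neg hc]; exact hds'

lemma pvDict_size_keys {κ ν : Type} (d : PySem.Dict κ ν) : d.size = d.keys.length := by
  simp [PySem.Dict.size, PySem.Dict.keys]

-- column view of the grid ---------------------------------------------------

def pvSinkCol (m : Int) : Nat → Int → List (Option Char) → List (Option Char)
  | 0, _, cs => cs
  | fuel+1, k, cs =>
    if k + 1 < m ∧ ¬ PySem.List.pyGetD cs k none = none ∧
        PySem.List.pyGetD cs (k+1) none = none then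
      pvSinkCol m fuel (k+1)
        (PySem.List.pySetD (PySem.List.pySetD cs k (PySem.List.pyGetD cs (k+1) none)) (k+1)
          (PySem.List.pyGetD cs k none))
    else cs

def pvCol (g : PvGrid) (j : Int) : List (Option Char) :=
  g.map (fun r => PySem.List.pyGetD r j none)

def pvWriteCol (g : PvGrid) (j : Int) (cs : List (Option Char)) : PvGrid :=
  (g.zip cs).map (fun rv => PySem.List.pySetD rv.1 j rv.2)

lemma pvSinkCol_length (m : Int) (fuel : Nat) :
    ∀ (k : Int) (cs : List (Option Char)), (pvSinkCol m fuel k cs).length = cs.length := by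
  induction fuel with
  | zero => intro k cs; rfl
  | succ fuel ih =>
    intro k cs
    unfold pvSinkCol
    split
    · rw [ih, PySem.List.length_pySetD, PySem.List.length_pySetD]
    · rfl

lemma pvWriteCol_length (g : PvGrid) (j : Int) (cs : List (Option Char))
    (hc : cs.length = g.length) : (pvWriteCol g j cs).length = g.length := by
  simp [pvWriteCol, hc]

lemma pvWriteCol_getElem (g : PvGrid) (j : Int) (cs : List (Option Char)) (r : Nat)
    (hr : r < g.length) (hrc : r < cs.length)
    (hrw : r < (pvWriteCol g j cs).length) :
    (pvWriteCol g j cs)[r]'hrw = PySem.List.pySetD (g[r]'hr) j (cs[r]'hrc) := by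
  simp [pvWriteCol]

lemma pv_pyIdx?_of_lt (len : Nat) (i : Int) (h0 : 0 ≤ i) (h1 : i < (len : Int)) :
    PySem.List.pyIdx? len i = some i.toNat := by
  unfold PySem.List.pyIdx?
  rw [if_pos h0, if_pos h1]

lemma pvRow_set_getD (r : List (Option Char)) (j : Int) (h0 : 0 ≤ j) (h1 : j < (r.length : Int)) :
    PySem.List.pySetD r j (PySem.List.pyGetD r j none) = r := by
  rw [PySem.List.pyGetD_eq_getElem r none h0 h1, PySem.List.pySetD_of_nonneg r _ h0,
      List.set_getElem_self]

lemma pvWriteCol_self (m n : Int) (g : PvGrid) (j : Int) (hd : pvDims m n g)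
    (h0 : 0 ≤ j) (h1 : j < n) : pvWriteCol g j (pvCol g j) = g := by
  apply List.ext_getElem
  · rw [pvWriteCol_length g j _ (by simp [pvCol])]
  · intro r hr hr'
    rw [pvWriteCol_getElem g j _ r hr' (by simpa [pvCol] using hr')]
    have hrow : ((g[r]'hr').length : Int) = n := hd.2 _ (List.getElem_mem _)
    have hcol : (pvCol g j)[r]'(by simpa [pvCol] using hr') =
        PySem.List.pyGetD (g[r]'hr') j none := by simp [pvCol]
    rw [hcol, pvRow_set_getD _ j h0 (by omega)]

lemma pvGet_write (m n : Int) (g : PvGrid) (j : Int) (cs : List (Option Char))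
    (hd : pvDims m n g) (hc : cs.length = g.length) (h0 : 0 ≤ j) (h1 : j < n)
    (i : Int) (hi0 : 0 ≤ i) (hi1 : i < (g.length : Int)) :
    pvGet (pvWriteCol g j cs) i j = PySem.List.pyGetD cs i none := by
  have hlt : i.toNat < g.length := by omega
  have hw := pvWriteCol_length g j cs hc
  unfold pvGet
  rw [PySem.List.pyGetD_eq_getElem _ [] hi0 (by omega),
      PySem.List.pyGetD_eq_getElem cs none hi0 (by omega)]
  rw [pvWriteCol_getElem g j cs i.toNat hlt (by omega) (by omega)]
  have hrow : ((g[i.toNat]'hlt).length : Int) = n := hd.2 _ (List.getElem_mem _)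
  rw [PySem.List.pySetD_of_nonneg _ _ h0]
  rw [PySem.List.pyGetD_eq_getElem _ none h0 (by simp; omega)]
  rw [List.getElem_set_self]

lemma pvSet_write (m n : Int) (g : PvGrid) (j : Int) (cs : List (Option Char))
    (hd : pvDims m n g) (hc : cs.length = g.length) (h0 : 0 ≤ j) (h1 : j < n)
    (i : Int) (hi0 : 0 ≤ i) (hi1 : i < (g.length : Int)) (v : Option Char) :
    pvSet (pvWriteCol g j cs) i j v = pvWriteCol g j (PySem.List.pySetD cs i v) := by
  have hlt : i.toNat < g.length := by omega
  have hw := pvWriteCol_length g j cs hc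
  have hidx : PySem.List.pyIdx? (pvWriteCol g j cs).length i = some i.toNat := by
    rw [hw]; exact pv_pyIdx?_of_lt _ i hi0 hi1
  rw [pvSet_in _ i j v i.toNat hidx]
  rw [PySem.List.pySetD_of_nonneg cs v hi0]
  apply List.ext_getElem
  · simp [pvWriteCol, hc]
  · intro r hr hr'
    have hrg : r < g.length := by simpa [hw] using hr
    have hcr : r < cs.length := by omega
    rw [List.getElem_set]
    have hsetj : ∀ (row : List (Option Char)) (w : Option Char),
        PySem.List.pySetD row j w = row.set j.toNat w :=
      fun row w => PySem.List.pySetD_of_nonneg row w h0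
    by_cases hri : i.toNat = r
    · rw [if_pos hri]
      subst hri
      rw [pvWriteCol_getElem g j cs i.toNat hrg hcr (by omega)]
      rw [pvWriteCol_getElem g j (cs.set i.toNat v) i.toNat hrg (by simpa using hcr)
        (by simp [pvWriteCol, hc]; omega)]
      rw [List.getElem_set_self]
      rw [hsetj, hsetj, hsetj, List.set_set]
    · rw [if_neg hri]
      rw [pvWriteCol_getElem g j cs r hrg hcr (by omega)]
      rw [pvWriteCol_getElem g j (cs.set i.toNat v) r hrg (by simpa using hcr)
        (by simp [pvWriteCol, hc]; omega)]
      congr 1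
      exact (List.getElem_set_ne hri _).symm

lemma pv_getD_mid' (u rest : List (Option Char)) (x : Option Char) :
    PySem.List.pyGetD (u ++ x :: rest) (u.length : Int) none = x := by
  rw [PySem.List.pyGetD_natCast]; exact pv_getD_mid u rest x none

lemma pv_set_mid' (u rest : List (Option Char)) (x v : Option Char) :
    PySem.List.pySetD (u ++ x :: rest) (u.length : Int) v = u ++ v :: rest := by
  rw [PySem.List.pySetD_natCast]; exact pv_set_mid u rest x v

lemma pvSink_write (m n : Int) (g : PvGrid) (j : Int) (hd : pvDims m n g)
    (hm : m = (g.length : Int)) (h0 : 0 ≤ j) (h1 : j < n) :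
    ∀ (fuel : Nat) (k : Int) (cs : List (Option Char)), cs.length = g.length → 0 ≤ k →
      pvSink m j fuel k (pvWriteCol g j cs) = pvWriteCol g j (pvSinkCol m fuel k cs) := by
  intro fuel
  induction fuel with
  | zero => intro k cs hc hk; rfl
  | succ fuel ih =>
    intro k cs hc hk
    unfold pvSink pvSinkCol
    by_cases hkm : k + 1 < m
    · have hklt : k < (g.length : Int) := by omega
      have hk1lt : k + 1 < (g.length : Int) := by omega
      rw [pvGet_write m n g j cs hd hc h0 h1 k hk hklt,
          pvGet_write m n g j cs hd hc h0 h1 (k+1) (by omega) hk1lt]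
      by_cases hg2 : ¬ PySem.List.pyGetD cs k none = none ∧
          PySem.List.pyGetD cs (k+1) none = none
      · rw [if_pos ⟨hkm, hg2.1, hg2.2⟩, if_pos ⟨hkm, hg2.1, hg2.2⟩]
        rw [pvSet_write m n g j cs hd hc h0 h1 k hk hklt _,
            pvSet_write m n g j _ hd (by rw [PySem.List.length_pySetD]; exact hc) h0 h1 (k+1)
              (by omega) hk1lt _]
        exact ih (k+1) _ (by rw [PySem.List.length_pySetD, PySem.List.length_pySetD]; exact hc)
          (by omega)
      · rw [if_neg (fun h => hg2 ⟨h.2.1, h.2.2⟩), if_neg (fun h => hg2 ⟨h.2.1, h.2.2⟩)]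
    · rw [if_neg (fun h => hkm h.1), if_neg (fun h => hkm h.1)]

lemma pvSinkCol_stay (m : Int) (fuel : Nat) (k : Int) (cs : List (Option Char))
    (h : PySem.List.pyGetD cs k none = none) : pvSinkCol m fuel k cs = cs := by
  cases fuel with
  | zero => rfl
  | succ fuel =>
    unfold pvSinkCol
    rw [if_neg (fun hcond => hcond.2.1 h)]

-- the pure column fact: one sink run carries a block down through the blanks ----

def pvFilt (l : List (Option Char)) : List (Option Char) := l.filter (fun x => x.isSome)

def pvCompact (l : List (Option Char)) : List (Option Char) :=
  List.replicate (l.length - (pvFilt l).length) none ++ pvFilt l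

lemma pvFilt_len_le (l : List (Option Char)) : (pvFilt l).length ≤ l.length :=
  List.length_filter_le _ _

lemma pvCompact_length (l : List (Option Char)) : (pvCompact l).length = l.length := by
  have := pvFilt_len_le l
  simp [pvCompact]
  omega

lemma pvCompact_short (l : List (Option Char)) (h : l.length ≤ 1) : pvCompact l = l := by
  match l, h with
  | [], _ => rfl
  | [x], _ => cases x <;> rfl

lemma pvSink_step (M : Nat) (a : Char) (ws : List (Option Char))
    (hws : ∀ w ∈ ws, w.isSome = true) :
    ∀ (e fuel : Nat) (u : List (Option Char)),
      u.length + 1 + e + ws.length = M → e < fuel →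
      pvSinkCol (M : Int) fuel (u.length : Int) (u ++ some a :: (List.replicate e none ++ ws)) =
        u ++ List.replicate e none ++ some a :: ws := by
  intro e
  induction e with
  | zero =>
    intro fuel u hlen hf
    cases fuel with
    | zero => omega
    | succ f =>
      unfold pvSinkCol
      rw [if_neg]
      · simp
      · rintro ⟨hlt, -, h3⟩
        cases ws with
        | nil => simp at hlen; omega
        | cons w ws' =>
          have hmid : ((u ++ [some a]) : List (Option Char)) ++ w :: ws' =
              u ++ some a :: (List.replicate 0 none ++ w :: ws') := by simp
          rw [show ((u.length : Int) + 1) = (((u ++ [some a]).length : Nat) : Int) by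
                simp, ← hmid, pv_getD_mid'] at h3
          have := hws w (by simp)
          rw [h3] at this
          simp at this
  | succ e ih =>
    intro fuel u hlen hf
    cases fuel with
    | zero => omega
    | succ f =>
      unfold pvSinkCol
      have hshape : u ++ some a :: (List.replicate (e+1) none ++ ws) =
          u ++ some a :: none :: (List.replicate e none ++ ws) := by
        simp [List.replicate_succ]
      rw [hshape]
      have hget1 : PySem.List.pyGetD (u ++ some a :: none :: (List.replicate e none ++ ws))
          (u.length : Int) none = some a := pv_getD_mid' _ _ _
      have hmid2 : u ++ some a :: none :: (List.replicate e none ++ ws) =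
          (u ++ [some a]) ++ none :: (List.replicate e none ++ ws) := by simp
      have hcast : ((u.length : Int) + 1) = (((u ++ [some a]).length : Nat) : Int) := by simp
      have hget2 : PySem.List.pyGetD (u ++ some a :: none :: (List.replicate e none ++ ws))
          ((u.length : Int) + 1) none = none := by
        rw [hcast, hmid2]; exact pv_getD_mid' _ _ _
      rw [if_pos ⟨by omega, by rw [hget1]; simp, hget2⟩]
      rw [hget1, hget2]
      rw [pv_set_mid']
      have hcast2 : ((u.length : Int) + 1) = (((u ++ [(none : Option Char)]).length : Nat) : Int) := by
        simp
      have hmid3 : u ++ (none : Option Char) :: (none : Option Char) ::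
            (List.replicate e none ++ ws) =
          (u ++ [(none : Option Char)]) ++ none :: (List.replicate e none ++ ws) := by simp
      rw [hcast2, hmid3, pv_set_mid']
      rw [ih f (u ++ [none]) (by simp; omega) (by omega)]
      simp [List.replicate_succ]

lemma pvCompact_cons_some (a : Char) (l : List (Option Char)) :
    pvCompact (some a :: l) =
      List.replicate (l.length - (pvFilt l).length) none ++ some a :: pvFilt l := by
  have := pvFilt_len_le l
  simp [pvCompact, pvFilt]

lemma pvFilt_cons_none (l : List (Option Char)) : pvFilt (none :: l) = pvFilt l := by
  simp [pvFilt]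

lemma pvCompact_cons_none (l : List (Option Char)) :
    pvCompact (none :: l) =
      none :: (List.replicate (l.length - (pvFilt l).length) none ++ pvFilt l) := by
  have := pvFilt_len_le l
  rw [pvCompact, pvFilt_cons_none, List.length_cons,
      show l.length + 1 - (pvFilt l).length = (l.length - (pvFilt l).length) + 1 from by omega,
      List.replicate_succ]
  simp

lemma pvPass_aux (M : Nat) (cs : List (Option Char)) (hcs : cs.length = M) (hM : 1 ≤ M) :
    ∀ (d : Nat), d ≤ M - 1 →
      (PySem.List.pyRange ((M : Int) - 2) (((M - 1 - d : Nat) : Int) - 1) (-1)).foldl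
          (fun c i => pvSinkCol (M : Int) M i c) cs =
        cs.take (M - 1 - d) ++ pvCompact (cs.drop (M - 1 - d)) := by
  intro d
  induction d with
  | zero =>
    intro _
    rw [PySem.List.pyRange_neg_one_eq_nil (by omega)]
    rw [List.foldl_nil, pvCompact_short _ (by simp; omega)]
    simp
  | succ d ih =>
    intro hdM
    have hM2 : 2 ≤ M := by omega
    have hi' : M - 1 - (d + 1) = M - 2 - d := by omega
    set i : Nat := M - 2 - d with hidef
    have hiM : i < M - 1 := by omega
    have hilt : i < cs.length := by omega
    -- split the countdown range at its last element i
    have hsplit : PySem.List.pyRange ((M : Int) - 2) (((M - 1 - (d+1) : Nat) : Int) - 1) (-1) =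
        PySem.List.pyRange ((M : Int) - 2) (((M - 1 - d : Nat) : Int) - 1) (-1) ++ [(i : Int)] := by
      rw [PySem.List.pyRange_neg_one_eq_reverse, PySem.List.pyRange_neg_one_eq_reverse]
      rw [show ((((M - 1 - (d+1) : Nat) : Int) - 1) + 1) = (i : Int) by omega]
      rw [show ((((M - 1 - d : Nat) : Int) - 1) + 1) = (i : Int) + 1 by omega]
      rw [PySem.List.pyRange_one_cons (by omega)]
      simp
    rw [hsplit, List.foldl_append, ih (by omega)]
    rw [List.foldl_cons, List.foldl_nil]
    -- the state so far: untouched prefix up to i+1, compacted suffix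
    have htake : cs.take (M - 1 - d) = cs.take i ++ [cs[i]'hilt] := by
      rw [show M - 1 - d = i + 1 by omega, List.take_add_one, List.getElem?_eq_getElem hilt]
      rfl
    have hdrop : cs.drop (M - 1 - d) = cs.drop (i + 1) := by rw [show M - 1 - d = i + 1 by omega]
    rw [htake, hdrop, hi']
    have hulen : (cs.take i).length = i := by simp; omega
    set l : List (Option Char) := cs.drop (i + 1) with hldef
    have hllen : l.length = M - i - 1 := by simp [hldef]; omega
    have hfws : ∀ w ∈ pvFilt l, w.isSome = true := fun w hw => List.of_mem_filter hw
    have hfl := pvFilt_len_le l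
    have hshape : cs.take i ++ [cs[i]'hilt] ++ pvCompact l =
        cs.take i ++ cs[i]'hilt ::
          (List.replicate (l.length - (pvFilt l).length) none ++ pvFilt l) := by
      rw [List.append_assoc, List.singleton_append, pvCompact]
    rw [hshape]
    have hdropi : cs.drop i = cs[i]'hilt :: l := by
      rw [hldef]; exact List.drop_eq_getElem_cons hilt
    cases hx : cs[i]'hilt with
    | none =>
      rw [pvSinkCol_stay _ _ _ _ (by
        rw [show (i : Int) = ((cs.take i).length : Int) by rw [hulen], pv_getD_mid'])]
      rw [hdropi, hx, pvCompact_cons_none]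
    | some a =>
      have hstep := pvSink_step M a (pvFilt l) hfws (l.length - (pvFilt l).length) M
        (cs.take i) (by omega) (by omega)
      rw [show (i : Int) = ((cs.take i).length : Int) by rw [hulen]]
      rw [hstep, hdropi, hx, pvCompact_cons_some]
      simp [List.append_assoc]

lemma pvPass (M : Nat) (cs : List (Option Char)) (hcs : cs.length = M) :
    (PySem.List.pyRange ((M : Int) - 2) (-1) (-1)).foldl
        (fun c i => pvSinkCol (M : Int) M i c) cs = pvCompact cs := by
  by_cases hM : M ≤ 1
  · rw [PySem.List.pyRange_neg_one_eq_nil (by omega), List.foldl_nil,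
        pvCompact_short _ (by omega)]
  · have h := pvPass_aux M cs hcs (by omega) (M - 1) (le_refl _)
    rw [show (((M - 1 - (M - 1) : Nat) : Int) - 1) = -1 from by omega,
        show M - 1 - (M - 1) = 0 from by omega] at h
    simpa using h

-- the grid-level column pass ------------------------------------------------

lemma pvMap_col (m n : Int) (g : PvGrid) (j : Int) (hm : m = (g.length : Int)) :
    (PySem.List.pyRange 0 m 1).map (fun i => pvGet g i j) = pvCol g j := by
  subst hm
  rw [PySem.List.pyRange_zero_natCast, List.map_map]
  apply List.ext_getElem
  · simp [pvCol]
  · intro r hr hr'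
    have hrg : r < g.length := by simpa using hr
    simp only [List.getElem_map, List.getElem_range, Function.comp_apply, pvCol]
    unfold pvGet
    rw [PySem.List.pyGetD_eq_getElem g [] (by omega) (by simpa using hrg)]
    simp

lemma pvDims_writeCol (m n : Int) (g : PvGrid) (j : Int) (cs : List (Option Char))
    (hd : pvDims m n g) (hc : cs.length = g.length) : pvDims m n (pvWriteCol g j cs) := by
  constructor
  · rw [pvWriteCol_length g j cs hc]; exact hd.1
  · intro r hr
    simp only [pvWriteCol, List.mem_map] at hr
    obtain ⟨⟨row, v⟩, hmem, hrow⟩ := hr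
    subst hrow
    rw [PySem.List.length_pySetD]
    exact hd.2 _ (List.of_mem_zip hmem).1

lemma pvSinkFold_write (m n : Int) (g : PvGrid) (j : Int) (hd : pvDims m n g)
    (hm : m = (g.length : Int)) (h0 : 0 ≤ j) (h1 : j < n) :
    ∀ (l : List Int), (∀ i ∈ l, 0 ≤ i) → ∀ (cs : List (Option Char)), cs.length = g.length →
      l.foldl (fun g i => pvSink m j m.toNat i g) (pvWriteCol g j cs) =
        pvWriteCol g j (l.foldl (fun c i => pvSinkCol m m.toNat i c) cs) := by
  intro l
  induction l with
  | nil => intro _ cs hc; rfl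
  | cons a l ih =>
    intro hpos cs hc
    rw [List.foldl_cons, List.foldl_cons,
        pvSink_write m n g j hd hm h0 h1 m.toNat a cs hc (hpos a (by simp))]
    exact ih (fun i hi => hpos i (by simp [hi])) _ (by rw [pvSinkCol_length]; exact hc)

lemma pvWriteFold (m n : Int) (g : PvGrid) (j : Int) (hd : pvDims m n g)
    (hm : m = (g.length : Int)) (h0 : 0 ≤ j) (h1 : j < n)
    (col : List (Option Char)) (hcol : col.length = g.length) :
    ∀ (K : Nat), K ≤ g.length →
      (PySem.List.pyRange 0 (K : Int) 1).foldl
          (fun g' i => pvSet g' i j (PySem.List.pyGetD col i none)) g =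
        pvWriteCol g j (col.take K ++ (pvCol g j).drop K) := by
  intro K
  induction K with
  | zero =>
    intro _
    rw [show ((0 : Nat) : Int) = 0 from rfl, PySem.List.pyRange_one_eq_nil (by omega),
        List.foldl_nil]
    simp [pvWriteCol_self m n g j hd h0 h1]
  | succ K ih =>
    intro hK
    have hKlt : K < g.length := by omega
    have hmix : (col.take K ++ (pvCol g j).drop K).length = g.length := by
      have h1' : (pvCol g j).length = g.length := by simp [pvCol]
      simp
      omega
    rw [show ((K + 1 : Nat) : Int) = (K : Int) + 1 from by push_cast; ring,
        PySem.List.pyRange_one_succ_right (by omega), List.foldl_append,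
        ih (by omega), List.foldl_cons, List.foldl_nil]
    rw [pvSet_write m n g j _ hd hmix h0 h1 (K : Int) (by omega) (by omega)]
    congr 1
    rw [PySem.List.pySetD_natCast, PySem.List.pyGetD_natCast,
        List.getD_eq_getElem col none (by omega)]
    have hcolK : (pvCol g j).drop K = (pvCol g j)[K]'(by simp [pvCol]; omega) ::
        (pvCol g j).drop (K + 1) := List.drop_eq_getElem_cons (by simp [pvCol]; omega)
    rw [List.set_append_right _ _ (by simp)]
    rw [show K - (col.take K).length = 0 from by simp; omega]
    rw [hcolK, List.set_cons_zero]
    have hKc : K < col.length := by omega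
    rw [List.take_add_one, List.getElem?_eq_getElem hKc, Option.toList_some,
        List.append_assoc, List.singleton_append]

lemma pvMove_eq (m n : Int) (g : PvGrid) (hd : pvDims m n g) :
    pvMove m n g = pvGravity m n g ∧ pvDims m n (pvGravity m n g) := by
  unfold pvMove pvGravity
  have hstep : ∀ (s : PvGrid) (a : Int), a ∈ PySem.List.pyRange 0 n 1 → pvDims m n s →
      ((PySem.List.pyRange (m-2) (-1) (-1)).foldl (fun g' i => pvSink m a m.toNat i g') s =
        (PySem.List.pyRange 0 m 1).foldl
          (fun g' i => pvSet g' i a (PySem.List.pyGetD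
            (List.replicate (m - ((((PySem.List.pyRange 0 m 1).map (fun i => pvGet s i a)).filter
                (fun c => c.isSome)).length : Int)).toNat none ++
              ((PySem.List.pyRange 0 m 1).map (fun i => pvGet s i a)).filter
                (fun c => c.isSome)) i none)) s) ∧
      pvDims m n ((PySem.List.pyRange (m-2) (-1) (-1)).foldl
        (fun g' i => pvSink m a m.toNat i g') s) := by
    intro s a ha hP
    obtain ⟨ha0, ha1⟩ := PySem.List.mem_pyRange_one.mp ha
    have hm : m = (s.length : Int) := hP.1.symm
    have hcollen : (pvCol s a).length = s.length := by simp [pvCol]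
    have hfle := pvFilt_len_le (pvCol s a)
    have hcomplen : (pvCompact (pvCol s a)).length = s.length := by
      rw [pvCompact_length, hcollen]
    have hAeq : (PySem.List.pyRange (m-2) (-1) (-1)).foldl
        (fun g' i => pvSink m a m.toNat i g') s = pvWriteCol s a (pvCompact (pvCol s a)) := by
      conv_lhs => rw [← pvWriteCol_self m n s a hP ha0 ha1]
      rw [pvSinkFold_write m n s a hP hm ha0 ha1 _
        (fun i hi => by have := (PySem.List.mem_pyRange_neg_one.mp hi).1; omega)
        (pvCol s a) hcollen]
      congr 1
      rw [hm]
      have := pvPass s.length (pvCol s a) hcollen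
      simpa using this
    have hBeq : (PySem.List.pyRange 0 m 1).foldl
          (fun g' i => pvSet g' i a (PySem.List.pyGetD
            (List.replicate (m - ((((PySem.List.pyRange 0 m 1).map (fun i => pvGet s i a)).filter
                (fun c => c.isSome)).length : Int)).toNat none ++
              ((PySem.List.pyRange 0 m 1).map (fun i => pvGet s i a)).filter
                (fun c => c.isSome)) i none)) s =
        pvWriteCol s a (pvCompact (pvCol s a)) := by
      rw [pvMap_col m n s a hm]
      have hcolumn : List.replicate
            (m - (((pvCol s a).filter (fun c => c.isSome)).length : Int)).toNat none ++
            (pvCol s a).filter (fun c => c.isSome) = pvCompact (pvCol s a) := by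
        unfold pvCompact pvFilt
        congr 2
        simp only [pvFilt] at hfle
        omega
      rw [hcolumn]
      have hw := pvWriteFold m n s a hP hm ha0 ha1 (pvCompact (pvCol s a)) hcomplen
        s.length (le_refl _)
      rw [← hm] at hw
      rw [hw]
      congr 1
      rw [List.take_of_length_le (by omega), List.drop_of_length_le (by omega)]
      simp
    refine ⟨hAeq.trans hBeq.symm, ?_⟩
    rw [hAeq]
    exact pvDims_writeCol m n s a _ hP hcomplen
  have h := pvFoldlCongrInv (pvDims m n) _ _ (PySem.List.pyRange 0 n 1) g hd
    (fun s a ha hs => hstep s a ha hs)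
  obtain ⟨heq, hP⟩ := h
  exact ⟨heq, heq ▸ hP⟩

lemma pvClear_dims (m n : Int) (g : PvGrid) (l : List (Int × Int)) (hd : pvDims m n g) :
    pvDims m n (l.foldl (fun g p => pvSet g p.1 p.2 none) g) :=
  pvFoldlInv (pvDims m n) _ l g hd (fun s p _ hs => pvDims_set m n s p.1 p.2 none hs)

lemma pvLoop_eq (m n : Int) :
    ∀ (fuel : Nat) (g : PvGrid) (cnt : Int), pvDims m n g →
      pvLoopA m n fuel g cnt = pvLoopB m n fuel g cnt := by
  intro fuel
  induction fuel with
  | zero => intro g cnt _; rfl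
  | succ fuel ih =>
    intro g cnt hd
    unfold pvLoopA pvLoopB
    have hk := pvPop_keys m n g
    have hsize : (pvPop m n g).size = (pvMark m n g).length := by
      rw [pvDict_size_keys, hk]
    simp only [hsize, hk]
    by_cases hz : (pvMark m n g).length = 0
    · rw [if_pos hz, if_pos hz]
    · rw [if_neg hz, if_neg hz]
      have hd' : pvDims m n ((pvMark m n g).foldl (fun g p => pvSet g p.1 p.2 none) g) :=
        pvClear_dims m n g _ hd
      obtain ⟨hmv, hdm⟩ := pvMove_eq m n _ hd'
      rw [hmv]
      exact ih _ _ hdm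

-- ===== VERDICT (by name: the statement is the Claim_ definition above) =====
theorem solution_spec : Claim_equal_solution := by
  intro m n board hdom hpre
  unfold Spec_solution solution solution_alt
  by_cases hdeg : m ≤ 1 ∨ n ≤ 1
  · rw [pvLoopA_degenerate m n hdeg, pvLoopB_degenerate m n hdeg]
  · have hpre' : (board.length : Int) = m ∧ ∀ s ∈ board, PySem.Str.len s = n := by
      rcases hpre with h | h
      · exact absurd h hdeg
      · exact h
    have hd : pvDims m n (pvToGrid board) := by
      constructor
      · simpa [pvToGrid] using hpre'.1
      · intro r hr
        simp only [pvToGrid, List.mem_map] at hr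
        obtain ⟨str, hs, hrr⟩ := hr
        subst hrr
        have := hpre'.2 str hs
        simpa [PySem.Str.len] using this
    exact pvLoop_eq m n _ _ 0 hd
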